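-- pv_equiv track=rewrite | github.com/xpqz/aoc-18 | day2.py | check
-- ===== SOURCE A (Python) =====
-- from collections import Counter
--
-- def check(item):
--     freq = Counter()
--     for letter in list(item):
--         freq[letter] += 1
--
--     twos = 0
--     threes = 0
--     for frequency in freq.values():
--         if frequency == 2:
--             twos = 1
--         if frequency == 3:
--             threes = 1
--
--     return (twos, threes)
-- ===== SOURCE B (Python) =====
-- def check(item):
--     # sort the letters, then scan adjacent runs; no hash-based counting
--     s = sorted(item)
--     twos = 0
--     threes = 0
--     run = 0
--     prev = None
--     for ch in s:
--         if ch == prev: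
--             run += 1
--         else:
--             if run == 2:
--                 twos = 1
--             if run == 3:
--                 threes = 1
--             run = 1
--             prev = ch
--     if run == 2:
--         twos = 1
--     if run == 3:
--         threes = 1
--     return (twos, threes)
-- ===== Notes on version B (the rewrite author's own statement) =====
-- stated objective: alternative
-- what changed: Replaces the Counter hash table and a second pass over its values by sorting the letters and scanning adjacent runs in one pass, setting the flags from run lengths.
import Mathlib
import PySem

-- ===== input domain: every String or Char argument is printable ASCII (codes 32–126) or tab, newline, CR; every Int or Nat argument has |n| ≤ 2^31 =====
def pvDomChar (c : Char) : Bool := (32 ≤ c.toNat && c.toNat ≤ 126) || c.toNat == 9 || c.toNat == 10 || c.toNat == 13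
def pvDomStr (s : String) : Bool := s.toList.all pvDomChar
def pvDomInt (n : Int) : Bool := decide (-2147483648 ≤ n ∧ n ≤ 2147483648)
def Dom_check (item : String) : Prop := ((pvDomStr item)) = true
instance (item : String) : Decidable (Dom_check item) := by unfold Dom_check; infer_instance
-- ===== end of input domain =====

-- B replaces the Counter hash table and a second values pass by sort-then-adjacent-run scan (alternative algorithm, not claimed faster).


-- ===== PORT A =====
def check (item : String) : Int × Int :=
  let freq : PySem.Dict Char Int :=
    item.toList.foldl (fun d letter => d.modify letter 0 (· + 1)) PySem.Dict.empty
  (PySem.Dict.values freq).foldl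
    (fun (acc : Int × Int) frequency =>
      ((if frequency = 2 then 1 else acc.1), (if frequency = 3 then 1 else acc.2)))
    (0, 0)

-- ===== PORT B =====
-- one loop iteration of Source B's scan: state (twos, threes, run, prev)
def bStep (acc : Int × Int × Int × Option Char) (ch : Char) : Int × Int × Int × Option Char :=
  let (twos, threes, run, prev) := acc
  if some ch = prev then (twos, threes, run + 1, prev)
  else ((if run = 2 then 1 else twos), (if run = 3 then 1 else threes), 1, some ch)

def check_alt (item : String) : Int × Int :=
  let s := PySem.List.sorted item.toList (fun c => c) false
  let fin := s.foldl bStep ((0 : Int), (0 : Int), (0 : Int), (none : Option Char))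
  ((if fin.2.2.1 = 2 then 1 else fin.1), (if fin.2.2.1 = 3 then 1 else fin.2.1))

-- ===== PRECONDITION & SPEC =====
def Spec_check (item : String) (out : Int × Int) : Prop := out = check_alt item
instance (item : String) (out : Int × Int) : Decidable (Spec_check item out) := by unfold Spec_check; infer_instance

-- ===== CLAIM (what is proved, stated in full; the proofs are below) =====
def Claim_equal_check : Prop := ∀ (item : String), Dom_check item → Spec_check item (check item)

-- ===== LEMMAS AND PROOFS =====

-- the final flush of Source B after the loop
def bFinish (st : Int × Int × Int × Option Char) : Int × Int :=
  ((if st.2.2.1 = 2 then 1 else st.1), (if st.2.2.1 = 3 then 1 else st.2.1))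

-- the condition under which a flag ends up set, given pending state (prev, run) and remaining sorted input
def runCondB (p : Option Char) (r : Int) (s : List Char) (n : Int) : Bool :=
  match p with
  | some c₀ => (r + (s.count c₀ : Int) == n) || s.any (fun c => decide (c ≠ c₀) && ((s.count c : Int) == n))
  | none => (r == n) || s.any (fun c => ((s.count c : Int) == n))

lemma if_or_collapse (A : Bool) (C : Prop) [Decidable C] (t : Int) :
    (if A then (1 : Int) else if C then 1 else t) = if (A || decide C) then 1 else t := by
  by_cases hC : C <;> cases A <;> simp [hC]

lemma cnt_ne {x c : Char} (rest : List Char) (hne : x ≠ c) :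
    (c :: rest).count x = rest.count x := by
  simp [(Ne.symm hne : ¬ c = x)]

lemma runCondB_cons_self (c : Char) (rest : List Char) (r n : Int) :
    runCondB (some c) r (c :: rest) n = runCondB (some c) (r + 1) rest n := by
  rw [Bool.eq_iff_iff]
  simp only [runCondB, List.any_cons, List.any_eq_true, Bool.or_eq_true, Bool.and_eq_true,
    decide_eq_true_eq, beq_iff_eq, List.count_cons_self, ne_eq, not_true_eq_false, false_and, false_or]
  constructor
  · rintro (h | ⟨x, hx, hne, hcnt⟩)
    · left; push_cast at h ⊢; omega
    · right; exact ⟨x, hx, hne, by rwa [cnt_ne rest hne] at hcnt⟩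
  · rintro (h | ⟨x, hx, hne, hcnt⟩)
    · left; push_cast at h ⊢; omega
    · right; exact ⟨x, hx, hne, by rwa [cnt_ne rest hne]⟩

lemma runCondB_cons_ne (c : Char) (rest : List Char) (r n : Int) (p : Option Char)
    (hp : ∀ c₀, p = some c₀ → c₀ ∉ c :: rest) :
    runCondB p r (c :: rest) n = (runCondB (some c) 1 rest n || decide (r = n)) := by
  rw [Bool.eq_iff_iff]
  match p with
  | none =>
    simp only [runCondB, List.any_cons, List.any_eq_true, Bool.or_eq_true, beq_iff_eq,
      Bool.and_eq_true, decide_eq_true_eq, List.count_cons_self, ne_eq]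
    constructor
    · rintro (h | h | ⟨x, hx, hcnt⟩)
      · right; exact h
      · left; left; push_cast at h ⊢; omega
      · by_cases hxc : x = c
        · subst hxc; rw [List.count_cons_self] at hcnt; left; left; push_cast at hcnt ⊢; omega
        · left; right; exact ⟨x, hx, hxc, by rwa [cnt_ne rest hxc] at hcnt⟩
    · rintro ((h | ⟨x, hx, hne, hcnt⟩) | h)
      · right; left; push_cast at h ⊢; omega
      · right; right; exact ⟨x, hx, by rwa [cnt_ne rest hne]⟩
      · left; exact h
  | some c₀ =>
    have hc₀ : c₀ ∉ c :: rest := hp c₀ rfl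
    have hcnt0 : (c :: rest).count c₀ = 0 := List.count_eq_zero.mpr hc₀
    have hne0 : c ≠ c₀ := fun h => hc₀ (h ▸ List.mem_cons_self)
    simp only [runCondB, List.any_cons, List.any_eq_true, Bool.or_eq_true, beq_iff_eq,
      Bool.and_eq_true, decide_eq_true_eq, hcnt0, ne_eq, List.count_cons_self]
    constructor
    · rintro (h | ⟨_, h⟩ | ⟨x, hx, hnex, hcnt⟩)
      · right; push_cast at h; omega
      · left; left; push_cast at h ⊢; omega
      · by_cases hxc : x = c
        · subst hxc; rw [List.count_cons_self] at hcnt; left; left; push_cast at hcnt ⊢; omega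
        · left; right
          exact ⟨x, hx, hxc, by rwa [cnt_ne rest hxc] at hcnt⟩
    · rintro ((h | ⟨x, hx, hnex, hcnt⟩) | h)
      · right; left; exact ⟨hne0, by push_cast at h ⊢; omega⟩
      · right; right
        have : x ≠ c₀ := fun hx0 => hc₀ (hx0 ▸ List.mem_cons_of_mem c hx)
        exact ⟨x, hx, this, by rwa [cnt_ne rest hnex]⟩
      · left; push_cast; omega

lemma flags_fold (vs : List Int) : ∀ t th : Int,
    vs.foldl (fun (acc : Int × Int) frequency =>
        ((if frequency = 2 then 1 else acc.1), (if frequency = 3 then 1 else acc.2))) (t, th)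
      = ((if (2 : Int) ∈ vs then 1 else t), (if (3 : Int) ∈ vs then 1 else th)) := by
  induction vs with
  | nil => simp
  | cons v vs ih =>
    intro t th
    simp only [List.foldl_cons]
    rw [ih]
    by_cases h2 : v = 2 <;> by_cases h3 : v = 3 <;>
      by_cases m2 : (2 : Int) ∈ vs <;> by_cases m3 : (3 : Int) ∈ vs <;>
      simp [h2, h3, m2, m3, List.mem_cons] <;> omega

lemma scan_go : ∀ (s : List Char), s.Pairwise (· ≤ ·) →
    ∀ (t th r : Int) (p : Option Char), (∀ c₀, p = some c₀ → ∀ x ∈ s, c₀ ≤ x) →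
    bFinish (List.foldl bStep (t, th, r, p) s) =
      ((if runCondB p r s 2 then 1 else t), (if runCondB p r s 3 then 1 else th)) := by
  intro s
  induction s with
  | nil =>
    intro _ t th r p _
    cases p <;> simp [bFinish, runCondB]
  | cons c rest ih =>
    intro hs t th r p hp
    obtain ⟨hc, hrest⟩ := List.pairwise_cons.mp hs
    simp only [List.foldl_cons, bStep]
    by_cases hpc : some c = p
    · rw [if_pos hpc]
      rw [ih hrest t th (r + 1) p (by intro c₀ h x hx; rw [← hpc] at h; cases h; exact hc x hx)]
      rw [← hpc, runCondB_cons_self, runCondB_cons_self]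
    · rw [if_neg hpc]
      rw [ih hrest _ _ 1 (some c) (by intro c₀ h x hx; cases h; exact hc x hx)]
      have hpnot : ∀ c₀, p = some c₀ → c₀ ∉ c :: rest := by
        intro c₀ h hmem
        rcases List.mem_cons.mp hmem with h1 | h1
        · subst h1; exact hpc h.symm
        · have h2 := hp c₀ h c List.mem_cons_self
          have h3 := hc c₀ h1
          have : c = c₀ := le_antisymm h3 h2
          exact hpc (by rw [this, h])
      rw [if_or_collapse, if_or_collapse,
        runCondB_cons_ne c rest r 2 p hpnot, runCondB_cons_ne c rest r 3 p hpnot]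

lemma mem_values_counter (xs : List Char) (n : Int) :
    n ∈ PySem.Dict.values (PySem.Dict.counter xs) ↔ ∃ c ∈ xs, (xs.count c : Int) = n := by
  simp only [PySem.Dict.values, PySem.Dict.items_counter, List.map_map, List.mem_map,
    Function.comp, PySem.Set.mem_ofList]

lemma check_eq (item : String) :
    check item = ((if ∃ c ∈ item.toList, (item.toList.count c : Int) = 2 then 1 else 0),
                  (if ∃ c ∈ item.toList, (item.toList.count c : Int) = 3 then 1 else 0)) := by
  unfold check
  rw [← PySem.Dict.counter_eq_foldl, flags_fold]
  rw [if_congr (mem_values_counter item.toList 2) rfl rfl,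
    if_congr (mem_values_counter item.toList 3) rfl rfl]

lemma check_alt_eq (item : String) :
    check_alt item = ((if ∃ c ∈ item.toList, (item.toList.count c : Int) = 2 then 1 else 0),
                      (if ∃ c ∈ item.toList, (item.toList.count c : Int) = 3 then 1 else 0)) := by
  unfold check_alt
  have hperm : (PySem.List.sorted item.toList (fun c => c) false).Perm item.toList :=
    PySem.List.sorted_perm _ _ _
  have hpw : (PySem.List.sorted item.toList (fun c => c) false).Pairwise (· ≤ ·) :=
    PySem.List.sorted_pairwise _ _
  have h := scan_go (PySem.List.sorted item.toList (fun c => c) false) hpw 0 0 0 none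
    (by intro c₀ h; cases h)
  simp only [bFinish] at h
  rw [h]
  have key : ∀ n : Int, n ≠ 0 →
      ((runCondB none 0 (PySem.List.sorted item.toList (fun c => c) false) n = true)
        ↔ (∃ c ∈ item.toList, (item.toList.count c : Int) = n)) := by
    intro n hn
    simp only [runCondB, List.any_eq_true, Bool.or_eq_true, beq_iff_eq]
    constructor
    · rintro (h0 | ⟨c, hc, hcnt⟩)
      · exact absurd h0.symm hn
      · exact ⟨c, hperm.mem_iff.mp hc, by rw [← hperm.count_eq]; exact hcnt⟩
    · rintro ⟨c, hc, hcnt⟩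
      exact Or.inr ⟨c, hperm.mem_iff.mpr hc, by rw [hperm.count_eq]; exact hcnt⟩
  rw [if_congr (key 2 (by norm_num)) rfl rfl, if_congr (key 3 (by norm_num)) rfl rfl]

-- ===== VERDICT (by name: the statement is the Claim_ definition above) =====
theorem check_spec : Claim_equal_check := by
  intro item _
  unfold Spec_check
  rw [check_eq, check_alt_eq]
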